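-- pv_equiv track=rewrite | github.com/cmartinezal/Array-to-BST | src/binary_tree/binary_tree.py | generate_graph_list
-- ===== SOURCE A (Python) =====
-- from typing import Optional
-- from typing import List
--
-- def generate_graph_list(nums : List[int]) -> Optional[int]:
--     graph_list = []
--     if len(nums) < 1:
--         return graph_list
--
--     mid_index = len(nums) // 2
--     graph_list.append(nums[mid_index])
--     graph_list.append(nums[mid_index -1]) if 0 < mid_index else None
--     graph_list.append(nums[len(nums) -1]) if len(nums) -1 > mid_index else None
--
--     pos_left = 0
--     pos_right = len(nums) - 2
--     num_pos = 0
--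
--     while pos_left < (mid_index - 1):
--         num_pos += 1
--         is_even_pos = (num_pos % 2) == 0
--         #left child
--         if (is_even_pos) == 0:
--             graph_list.append(nums[pos_left])
--             graph_list.append(None)
--         pos_left += 1
--
--         #right child
--         if not pos_right > mid_index:
--             continue
--
--         if (is_even_pos) == 0:
--             graph_list.append(nums[pos_right])
--             graph_list.append(None)
--         pos_right -= 1
--
--     return graph_list
-- ===== SOURCE B (Python) =====
-- from typing import Optional
-- from typing import List
--
-- def generate_graph_list(nums : List[int]) -> Optional[int]:
--     n = len(nums)
--     if n < 1:
--         return []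
--     mid = n // 2
--     out = [nums[mid]]
--     if mid > 0:
--         out.append(nums[mid - 1])
--     if n - 1 > mid:
--         out.append(nums[n - 1])
--     for i in range(1, mid, 2):
--         out += [nums[i - 1], None]
--         if n - 1 - i > mid:
--             out += [nums[n - 1 - i], None]
--     return out
-- ===== Notes on version B (the rewrite author's own statement) =====
-- stated objective: simpler
-- what changed: Replaced A's while-loop with mutable pos_left/pos_right pointers and a parity counter (which appends only on odd iterations and desynchronizes the right pointer) by a single `for i in range(1, mid, 2)` loop that computes both indices in closed form (left: i-1, right: len-1-i) with no pointer state.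
import Mathlib
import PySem

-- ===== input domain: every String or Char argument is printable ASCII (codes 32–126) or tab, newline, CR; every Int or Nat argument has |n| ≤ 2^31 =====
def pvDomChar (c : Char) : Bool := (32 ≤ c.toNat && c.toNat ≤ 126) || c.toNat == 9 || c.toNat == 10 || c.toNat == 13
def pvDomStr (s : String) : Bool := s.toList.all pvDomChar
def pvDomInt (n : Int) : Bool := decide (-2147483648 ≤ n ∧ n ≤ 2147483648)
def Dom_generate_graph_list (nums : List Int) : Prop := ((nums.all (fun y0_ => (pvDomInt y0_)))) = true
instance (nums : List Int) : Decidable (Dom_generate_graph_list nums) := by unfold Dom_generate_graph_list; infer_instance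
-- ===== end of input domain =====

-- B replaces A's two-pointer/parity-counter while-loop by a single stride-2 index loop with
-- closed-form indices (objective: simpler). Both ports are total; indices are always in range,
-- so pyGetD with default 0 is exact.

-- ===== PORT A =====
-- the while-loop of A, state = (graph_list, pos_left, pos_right, num_pos)
def pvALoop (nums : List Int) (mid : Int) (gl : List (Option Int))
    (posL posR numPos : Int) : List (Option Int) :=
  if h : posL < mid - 1 then
    let np := numPos + 1
    let isEven : Bool := PySem.Int.mod np 2 == 0
    let gl1 := if isEven = false then gl ++ [some (PySem.List.pyGetD nums posL 0), none] else gl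
    let pL := posL + 1
    if ¬ posR > mid then
      pvALoop nums mid gl1 pL posR np
    else
      let gl2 := if isEven = false then gl1 ++ [some (PySem.List.pyGetD nums posR 0), none] else gl1
      pvALoop nums mid gl2 pL (posR - 1) np
  else gl
termination_by (mid - 1 - posL).toNat
decreasing_by all_goals omega

def generate_graph_list (nums : List Int) : List (Option Int) :=
  let graph_list : List (Option Int) := []
  if nums.length < 1 then graph_list
  else
    let mid := PySem.Int.floordiv (nums.length : Int) 2
    let graph_list := graph_list ++ [some (PySem.List.pyGetD nums mid 0)]
    let graph_list := if 0 < mid then graph_list ++ [some (PySem.List.pyGetD nums (mid - 1) 0)] else graph_list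
    let graph_list := if (nums.length : Int) - 1 > mid then graph_list ++ [some (PySem.List.pyGetD nums ((nums.length : Int) - 1) 0)] else graph_list
    pvALoop nums mid graph_list 0 ((nums.length : Int) - 2) 0

-- ===== PORT B =====
def generate_graph_list_alt (nums : List Int) : List (Option Int) :=
  let n : Int := nums.length
  if n < 1 then []
  else
    let mid := PySem.Int.floordiv n 2
    let out := [some (PySem.List.pyGetD nums mid 0)]
    let out := if mid > 0 then out ++ [some (PySem.List.pyGetD nums (mid - 1) 0)] else out
    let out := if n - 1 > mid then out ++ [some (PySem.List.pyGetD nums (n - 1) 0)] else out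
    (PySem.List.pyRange 1 mid 2).foldl (fun acc i =>
      let acc := acc ++ [some (PySem.List.pyGetD nums (i - 1) 0), none]
      if n - 1 - i > mid then acc ++ [some (PySem.List.pyGetD nums (n - 1 - i) 0), none] else acc) out

-- ===== PRECONDITION & SPEC =====
def Spec_generate_graph_list (nums : List Int) (out : List (Option Int)) : Prop := out = generate_graph_list_alt nums
instance (nums : List Int) (out : List (Option Int)) : Decidable (Spec_generate_graph_list nums out) := by unfold Spec_generate_graph_list; infer_instance

-- ===== CLAIM (what is proved, stated in full; the proofs are below) =====
def Claim_equal_generate_graph_list : Prop := ∀ (nums : List Int), Dom_generate_graph_list nums → Spec_generate_graph_list nums (generate_graph_list nums)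

-- ===== LEMMAS AND PROOFS =====

-- the chunk B appends for odd index i
def pvChunk (nums : List Int) (n mid i : Int) : List (Option Int) :=
  [some (PySem.List.pyGetD nums (i - 1) 0), none] ++
    (if n - 1 - i > mid then [some (PySem.List.pyGetD nums (n - 1 - i) 0), none] else [])

theorem pvRange_two_nil (a b : Int) (h : b ≤ a) : PySem.List.pyRange a b 2 = [] := by
  rw [PySem.List.pyRange_of_pos _ _ (by norm_num)]
  simp [show ¬ a < b by omega]

theorem pvRange_two_cons (a b : Int) (h : a < b) :
    PySem.List.pyRange a b 2 = a :: PySem.List.pyRange (a + 2) b 2 := by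
  rw [PySem.List.pyRange_of_pos _ _ (by norm_num), PySem.List.pyRange_of_pos _ _ (by norm_num)]
  simp only [if_pos h]
  by_cases h2 : a + 2 < b
  · simp only [if_pos h2]
    have hm : ((b - a + 2 - 1) / 2).toNat = ((b - (a + 2) + 2 - 1) / 2).toNat + 1 := by omega
    rw [hm, List.range_succ_eq_map]
    simp only [List.map_cons, List.map_map]
    refine List.cons_eq_cons.mpr ⟨by simp, ?_⟩
    apply List.map_congr_left
    intro k _
    simp only [Function.comp]
    push_cast
    ring
  · simp only [if_neg h2]
    have hm : ((b - a + 2 - 1) / 2).toNat = 1 := by omega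
    rw [hm]
    simp

theorem pvMod_two_odd (t : Nat) : PySem.Int.mod (2 * (t : Int) + 1) 2 = 1 := by
  rw [PySem.Int.mod_eq_emod_of_pos (by norm_num)]
  omega

-- A's loop, started at an even iteration count 2t with pos_right at its invariant value,
-- appends exactly B's chunks for the odd indices in [2t+1, mid).
theorem pvALoop_eq (nums : List Int) (n mid : Int) (hn : n = (nums.length : Int))
    (fuel : Nat) :
    ∀ (t : Nat) (gl : List (Option Int)), (mid - 1 - 2 * (t : Int)).toNat ≤ fuel →
    pvALoop nums mid gl (2 * (t : Int)) (max mid (n - 2 - 2 * (t : Int))) (2 * (t : Int))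
      = gl ++ (PySem.List.pyRange (2 * (t : Int) + 1) mid 2).flatMap (pvChunk nums n mid) := by
  induction fuel with
  | zero =>
    intro t gl hf
    rw [pvALoop]
    rw [dif_neg (by omega), pvRange_two_nil _ _ (by omega)]
    simp
  | succ fuel ih =>
    intro t gl hf
    by_cases h : 2 * (t : Int) < mid - 1
    · rw [pvALoop, dif_pos h]
      simp only [pvMod_two_odd t, show (((1 : Int) == 0) = false) = True by simp, if_true]
      rw [pvRange_two_cons _ _ (by omega)]
      by_cases hr : max mid (n - 2 - 2 * (t : Int)) > mid
      · -- right pointer above mid: append right chunk too, then decrement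
        rw [if_neg (by omega)]
        -- second (even) iteration
        rw [pvALoop]
        by_cases h2 : 2 * (t : Int) + 1 < mid - 1
        · rw [dif_pos h2]
          by_cases hr2 : max mid (n - 2 - 2 * (t : Int)) - 1 > mid
          · rw [if_neg (by omega)]
            have e1 : max mid (n - 2 - 2 * (t : Int)) - 1 - 1
                = max mid (n - 2 - 2 * ((t + 1 : Nat) : Int)) := by push_cast; omega
            have e2 : 2 * (t : Int) + 1 + 1 = 2 * ((t + 1 : Nat) : Int) := by push_cast; ring
            rw [e1, e2, ih (t + 1) _ (by push_cast; omega)]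
            simp only [List.flatMap_cons, pvChunk, if_pos (by omega : n - 1 - (2 * (t : Int) + 1) > mid)]
            have e3 : max mid (n - 2 - 2 * (t : Int)) = n - 2 - 2 * (t : Int) := by omega
            rw [e3]
            have e4 : n - 2 - 2 * (t : Int) = n - 1 - (2 * (t : Int) + 1) := by ring
            rw [e4]
            have e5 : (2 * ((t + 1 : Nat) : Int) + 1) = 2 * (t : Int) + 1 + 2 := by push_cast; ring
            rw [e5]
            simp
          · rw [if_pos (by omega)]
            have e1 : max mid (n - 2 - 2 * (t : Int)) - 1
                = max mid (n - 2 - 2 * ((t + 1 : Nat) : Int)) := by push_cast; omega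
            have e2 : 2 * (t : Int) + 1 + 1 = 2 * ((t + 1 : Nat) : Int) := by push_cast; ring
            rw [e1, e2, ih (t + 1) _ (by push_cast; omega)]
            simp only [List.flatMap_cons, pvChunk, if_pos (by omega : n - 1 - (2 * (t : Int) + 1) > mid)]
            have e3 : max mid (n - 2 - 2 * (t : Int)) = n - 2 - 2 * (t : Int) := by omega
            rw [e3]
            have e4 : n - 2 - 2 * (t : Int) = n - 1 - (2 * (t : Int) + 1) := by ring
            rw [e4]
            have e5 : (2 * ((t + 1 : Nat) : Int) + 1) = 2 * (t : Int) + 1 + 2 := by push_cast; ring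
            rw [e5]
            simp
        · rw [dif_neg h2]
          rw [pvRange_two_nil _ _ (by omega)]
          simp only [List.flatMap_cons, List.flatMap_nil, List.append_nil, pvChunk,
            if_pos (by omega : n - 1 - (2 * (t : Int) + 1) > mid)]
          have e3 : max mid (n - 2 - 2 * (t : Int)) = n - 2 - 2 * (t : Int) := by omega
          rw [e3]
          have e4 : n - 2 - 2 * (t : Int) = n - 1 - (2 * (t : Int) + 1) := by ring
          rw [e4]
          simp
      · -- right pointer clamped at mid: continue without right chunk
        rw [if_pos (by omega)]
        -- second (even) iteration
        rw [pvALoop]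
        by_cases h2 : 2 * (t : Int) + 1 < mid - 1
        · rw [dif_pos h2]
          rw [if_pos (by omega)]
          have e1 : max mid (n - 2 - 2 * (t : Int))
              = max mid (n - 2 - 2 * ((t + 1 : Nat) : Int)) := by push_cast; omega
          have e2 : 2 * (t : Int) + 1 + 1 = 2 * ((t + 1 : Nat) : Int) := by push_cast; ring
          rw [e1, e2, ih (t + 1) _ (by push_cast; omega)]
          simp only [List.flatMap_cons, pvChunk, if_neg (by omega : ¬ n - 1 - (2 * (t : Int) + 1) > mid)]
          have e5 : (2 * ((t + 1 : Nat) : Int) + 1) = 2 * (t : Int) + 1 + 2 := by push_cast; ring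
          rw [e5]
          simp
        · rw [dif_neg h2]
          rw [pvRange_two_nil _ _ (by omega)]
          simp only [List.flatMap_cons, List.flatMap_nil, List.append_nil, pvChunk,
            if_neg (by omega : ¬ n - 1 - (2 * (t : Int) + 1) > mid)]
          simp
    · rw [pvALoop, dif_neg h, pvRange_two_nil _ _ (by omega)]
      simp

-- B's foldl as an append of flatMapped chunks
theorem pvFold_eq (nums : List Int) (n mid : Int) (out : List (Option Int)) (r : List Int) :
    r.foldl (fun acc i =>
      let acc := acc ++ [some (PySem.List.pyGetD nums (i - 1) 0), none]
      if n - 1 - i > mid then acc ++ [some (PySem.List.pyGetD nums (n - 1 - i) 0), none] else acc) out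
    = out ++ r.flatMap (pvChunk nums n mid) := by
  have : (fun (acc : List (Option Int)) i =>
      let acc := acc ++ [some (PySem.List.pyGetD nums (i - 1) 0), none]
      if n - 1 - i > mid then acc ++ [some (PySem.List.pyGetD nums (n - 1 - i) 0), none] else acc)
      = fun acc i => acc ++ pvChunk nums n mid i := by
    funext acc i
    simp only [pvChunk]
    split <;> simp
  rw [this, PySem.List.foldl_append_eq_flatMap]

-- ===== VERDICT (by name: the statement is the Claim_ definition above) =====
theorem generate_graph_list_spec : Claim_equal_generate_graph_list := by
  unfold Claim_equal_generate_graph_list Spec_generate_graph_list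
  intro nums _
  unfold generate_graph_list generate_graph_list_alt
  by_cases h0 : nums.length < 1
  · have he : nums = [] := by
      cases nums with
      | nil => rfl
      | cons a l => simp at h0
    subst he
    simp
  · simp only [if_neg h0]
    set n : Int := (nums.length : Int) with hn
    set mid : Int := PySem.Int.floordiv n 2 with hmid
    have hn1 : 1 ≤ n := by omega
    have hmid' : mid = n / 2 := by
      rw [hmid, PySem.Int.floordiv_eq_ediv_of_pos (by norm_num)]
    rw [if_neg (show ¬ n < 1 by omega), pvFold_eq]
    by_cases hm : mid < 2
    · rw [pvALoop, dif_neg (by omega), pvRange_two_nil _ _ (by omega)]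
      simp
    · have hmn : mid ≤ n - 2 := by omega
      simp only [if_pos (show (0:Int) < mid by omega), if_pos (show mid < n - 1 by omega),
        List.nil_append]
      have key := pvALoop_eq nums n mid hn (mid - 1).toNat 0
        (([some (PySem.List.pyGetD nums mid 0)] ++ [some (PySem.List.pyGetD nums (mid - 1) 0)]) ++
          [some (PySem.List.pyGetD nums (n - 1) 0)]) (by omega)
      simp only [Nat.cast_zero, mul_zero, zero_add, sub_zero] at key
      rw [show max mid (n - 2) = n - 2 from by omega] at key
      simpa using key
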